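-- pv_equiv track=rewrite | github.com/wgong/cs-faculty | app/app.py | _push_selected_cols_to_front
-- ===== SOURCE A (Python) =====
-- def _push_selected_cols_to_front(cols, selected_cols=["name","url"]):
--     """move selected column to the front,
--     e.g. name, url
--     """
--     new_select_cols = []
--     new_cols = []
--     for c in cols:
--         if c in selected_cols:
--             new_select_cols.append(c)
--         else:
--             new_cols.append(c)
--     if not new_select_cols:
--         return new_cols
--     else:
--         return new_select_cols + new_cols
-- ===== SOURCE B (Python) =====
-- def _push_selected_cols_to_front(cols, selected_cols=["name","url"]):
--     """move selected column to the front,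
--     e.g. name, url
--     """
--     return sorted(cols, key=lambda c: c not in selected_cols)
-- ===== Notes on version B (the rewrite author's own statement) =====
-- stated objective: idiomatic
-- what changed: Replaced the two-accumulator partition loop (plus a redundant empty-selection branch) with a single stable sort keyed on non-membership in selected_cols; stability keeps each group in original order.
import Mathlib
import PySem

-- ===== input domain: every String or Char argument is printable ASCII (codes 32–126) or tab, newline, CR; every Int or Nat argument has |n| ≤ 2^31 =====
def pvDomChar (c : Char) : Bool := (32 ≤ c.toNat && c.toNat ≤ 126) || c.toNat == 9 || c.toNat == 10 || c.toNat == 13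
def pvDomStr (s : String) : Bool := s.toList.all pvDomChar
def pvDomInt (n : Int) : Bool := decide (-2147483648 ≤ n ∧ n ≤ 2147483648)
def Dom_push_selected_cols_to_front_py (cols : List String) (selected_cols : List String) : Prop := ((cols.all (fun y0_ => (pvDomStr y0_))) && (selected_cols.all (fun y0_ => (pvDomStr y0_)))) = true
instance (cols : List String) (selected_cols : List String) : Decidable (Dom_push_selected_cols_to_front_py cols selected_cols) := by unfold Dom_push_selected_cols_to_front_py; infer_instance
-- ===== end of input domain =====

-- B replaces A's two-accumulator partition loop (and its redundant empty-selection branch)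
-- with a single stable sort keyed on non-membership in selected_cols (idiomatic; same result).


-- ===== PORT A =====
-- for c in cols: append c to new_select_cols if c in selected_cols else to new_cols;
-- then the empty-selection branch, as in the Python.
def push_selected_cols_to_front_py (cols : List String) (selected_cols : List String) : List String :=
  let st := cols.foldl
    (fun (acc : List String × List String) c =>
      if selected_cols.contains c then (acc.1 ++ [c], acc.2) else (acc.1, acc.2 ++ [c]))
    ([], [])
  if st.1.isEmpty then st.2 else st.1 ++ st.2

-- ===== PORT B =====
-- sorted(cols, key=lambda c: c not in selected_cols); bool key False/True ported as 0/1.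
def push_selected_cols_to_front_py_alt (cols : List String) (selected_cols : List String) : List String :=
  PySem.List.sorted cols (fun c => if selected_cols.contains c then (0 : Nat) else 1) false

-- ===== PRECONDITION & SPEC =====
def Spec_push_selected_cols_to_front_py (cols : List String) (selected_cols : List String) (out : List String) : Prop := out = push_selected_cols_to_front_py_alt cols selected_cols
instance (cols : List String) (selected_cols : List String) (out : List String) : Decidable (Spec_push_selected_cols_to_front_py cols selected_cols out) := by unfold Spec_push_selected_cols_to_front_py; infer_instance

-- ===== CLAIM (what is proved, stated in full; the proofs are below) =====
def Claim_equal_push_selected_cols_to_front_py : Prop := ∀ (cols : List String) (selected_cols : List String), Dom_push_selected_cols_to_front_py cols selected_cols → Spec_push_selected_cols_to_front_py cols selected_cols (push_selected_cols_to_front_py cols selected_cols)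

-- ===== LEMMAS AND PROOFS =====

-- the binary sort key
def pvKey (selected_cols : List String) (c : String) : Nat :=
  if selected_cols.contains c then 0 else 1

-- inserting a key-0 element into (all-key-0 ++ all-key-1) lands between the groups
theorem insertBy_key0 (sel : List String) (k : String → Nat) (x : String) (rest : List String)
    (hx : k x = 0) (hs : ∀ a ∈ sel, k a = 0) (hr : ∀ b ∈ rest, k b = 1) :
    PySem.List.insertBy (fun a b => decide (k a < k b)) x (sel ++ rest) = sel ++ x :: rest := by
  induction sel with
  | nil =>
    cases rest with
    | nil => simp [PySem.List.insertBy]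
    | cons r t =>
      have : k r = 1 := hr r (by simp)
      simp [PySem.List.insertBy, hx, this]
  | cons s st ih =>
    have hks : k s = 0 := hs s (by simp)
    simp only [List.cons_append, PySem.List.insertBy, hx, hks]
    simp only [Nat.lt_irrefl, decide_false]
    rw [ih (fun a ha => hs a (by simp [ha]))]
    simp

-- inserting a key-1 element appends at the end
theorem insertBy_key1 (ys : List String) (k : String → Nat) (x : String)
    (hx : k x = 1) (hy : ∀ y ∈ ys, k y ≤ 1) :
    PySem.List.insertBy (fun a b => decide (k a < k b)) x ys = ys ++ [x] := by
  induction ys with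
  | nil => simp [PySem.List.insertBy]
  | cons y t ih =>
    have : ¬ (k x < k y) := by
      have := hy y (by simp); omega
    simp only [PySem.List.insertBy, this, decide_false]
    rw [ih (fun a ha => hy a (by simp [ha]))]
    simp

-- the insertion-sort fold over cols, started on a partitioned accumulator, partitions
theorem foldl_insert_partition (selected_cols : List String) :
    ∀ (l s r : List String), (∀ a ∈ s, pvKey selected_cols a = 0) → (∀ b ∈ r, pvKey selected_cols b = 1) →
    l.foldl (fun acc x => PySem.List.insertBy
        (fun a b => decide (pvKey selected_cols a < pvKey selected_cols b)) x acc) (s ++ r)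
      = (s ++ l.filter (fun c => selected_cols.contains c)) ++
        (r ++ l.filter (fun c => !selected_cols.contains c)) := by
  intro l
  induction l with
  | nil => intro s r _ _; simp
  | cons c t ih =>
    intro s r hs hr
    by_cases hc : selected_cols.contains c = true
    · have hm : c ∈ selected_cols := by simpa using hc
      have hk : pvKey selected_cols c = 0 := by simp [pvKey, hm]
      simp only [List.foldl_cons]
      rw [insertBy_key0 s (pvKey selected_cols) c r hk hs hr]
      have : s ++ c :: r = (s ++ [c]) ++ r := by simp
      rw [this, ih (s ++ [c]) r
        (by intro a ha; rcases List.mem_append.1 ha with h | h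
            · exact hs a h
            · simp at h; subst h; exact hk) hr]
      simp [hm]
    · have hm : c ∉ selected_cols := by simpa using hc
      have hk : pvKey selected_cols c = 1 := by simp [pvKey, hm]
      simp only [List.foldl_cons]
      rw [insertBy_key1 (s ++ r) (pvKey selected_cols) c hk
        (by intro y hy; rcases List.mem_append.1 hy with h | h
            · rw [hs y h]; omega
            · rw [hr y h])]
      have : (s ++ r) ++ [c] = s ++ (r ++ [c]) := by simp
      rw [this, ih s (r ++ [c]) hs
        (by intro b hb; rcases List.mem_append.1 hb with h | h
            · exact hr b h
            · simp at h; subst h; exact hk)]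
      simp [hm]

-- B computes filterSel ++ filterNot
theorem alt_eq_filters (cols selected_cols : List String) :
    push_selected_cols_to_front_py_alt cols selected_cols
      = cols.filter (fun c => selected_cols.contains c) ++
        cols.filter (fun c => !selected_cols.contains c) := by
  unfold push_selected_cols_to_front_py_alt
  rw [show (fun c => if selected_cols.contains c then (0 : Nat) else 1) = pvKey selected_cols from rfl]
  rw [PySem.List.sorted_eq_foldl_insertBy]
  have := foldl_insert_partition selected_cols cols [] []
    (by intro a h; simp at h) (by intro b h; simp at h)
  simpa using this

-- A's loop computes the same two filters in its accumulators
theorem a_foldl_eq (selected_cols : List String) :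
    ∀ (l s r : List String),
    l.foldl (fun (acc : List String × List String) c =>
        if selected_cols.contains c then (acc.1 ++ [c], acc.2) else (acc.1, acc.2 ++ [c])) (s, r)
      = (s ++ l.filter (fun c => selected_cols.contains c),
         r ++ l.filter (fun c => !selected_cols.contains c)) := by
  intro l
  induction l with
  | nil => intro s r; simp
  | cons c t ih =>
    intro s r
    by_cases hc : selected_cols.contains c = true
    · simp only [List.foldl_cons, hc, ih, List.filter_cons]
      simp
    · simp only [List.foldl_cons, hc, ih, List.filter_cons]
      simp

-- ===== VERDICT (by name: the statement is the Claim_ definition above) =====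
theorem push_selected_cols_to_front_py_spec : Claim_equal_push_selected_cols_to_front_py := by
  intro cols selected_cols _
  unfold Spec_push_selected_cols_to_front_py
  rw [alt_eq_filters]
  unfold push_selected_cols_to_front_py
  rw [a_foldl_eq selected_cols cols [] []]
  simp only [List.nil_append]
  by_cases h : (cols.filter (fun c => selected_cols.contains c)).isEmpty = true
  · rw [if_pos h, List.isEmpty_iff.1 h]
    rfl
  · rw [if_neg h]
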